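-- pv_equiv track=rewrite | github.com/OmniNode-ai/omnibase | legacy/script/tool/python/python_tool_fix_format_headers.py | detect_and_remove_docstring
-- ===== SOURCE A (Python) =====
-- from typing import Set, Tuple
--
-- def detect_and_remove_docstring(content: str) -> Tuple[str, bool]:
--     """
--     Detect and remove existing module docstring from content.
--
--     Args:
--         content: The file content
--
--     Returns:
--         Tuple of (content with docstring removed, whether docstring was found)
--     """
--     lines = content.splitlines()
--
--     # Find docstring start
--     docstring_start = None
--     for i, line in enumerate(lines):
--         line = line.strip()
--         if line.startswith('"""') or line.startswith("'''"):
--             docstring_start = i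
--             break
--         elif line and not line.startswith("#"):
--             # Found non-comment, non-docstring content
--             break
--
--     if docstring_start is None:
--         return content, False
--
--     # Find docstring end
--     docstring_quotes = lines[docstring_start].strip()[0:3]
--     docstring_end = None
--
--     # Also check for single-quotes docstring
--     for i in range(docstring_start, len(lines)):
--         if i > docstring_start and docstring_quotes in lines[i]:
--             docstring_end = i
--             break
--
--     if docstring_end is None:
--         # Could not find matching end quotes
--         return content, False
--
--     # Skip any blank lines after docstring
--     code_start = docstring_end + 1
--     while code_start < len(lines) and not lines[code_start].strip():
--         code_start += 1
--
--     # Return content without docstring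
--     return "\n".join(lines[code_start:]), True
-- ===== SOURCE B (Python) =====
-- def detect_and_remove_docstring(content):
--     lines = content.splitlines()
--     state = 0  # 0: looking for opener, 1: looking for closer, 2: skipping blanks
--     quotes = ""
--     for idx, line in enumerate(lines):
--         if state == 0:
--             s = line.strip()
--             if s.startswith('"""') or s.startswith("'''"):
--                 quotes = s[0:3]
--                 state = 1
--             elif s and not s.startswith("#"):
--                 return content, False
--         elif state == 1:
--             if quotes in line:
--                 state = 2
--         elif line.strip():
--             return "\n".join(lines[idx:]), True
--     if state == 2:
--         return "", True
--     return content, False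
-- ===== Notes on version B (the rewrite author's own statement) =====
-- stated objective: alternative
-- what changed: A's three sequential scans (opener search by index, closer search over range(start,len), blank-skipping while loop) are replaced by a single pass over the lines with an explicit state variable (looking-for-opener / looking-for-closer / skipping-blanks) that returns as soon as the answer is known.
import Mathlib
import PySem

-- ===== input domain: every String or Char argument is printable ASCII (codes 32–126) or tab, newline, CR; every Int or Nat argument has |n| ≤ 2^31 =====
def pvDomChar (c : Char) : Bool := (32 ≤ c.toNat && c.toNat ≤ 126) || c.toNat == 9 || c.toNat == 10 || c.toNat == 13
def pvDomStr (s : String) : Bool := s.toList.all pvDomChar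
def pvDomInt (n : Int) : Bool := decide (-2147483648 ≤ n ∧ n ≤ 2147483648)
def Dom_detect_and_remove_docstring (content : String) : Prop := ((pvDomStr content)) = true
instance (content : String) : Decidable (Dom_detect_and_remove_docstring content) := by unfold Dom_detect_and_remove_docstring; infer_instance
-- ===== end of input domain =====

-- B rewrites A's three sequential scans as one single pass with an explicit state variable (alternative decomposition, same cost).

-- ===== PORT A =====
-- first loop: for i, line in enumerate(lines): find the docstring opener (or bail on real code)
def pvFindStartA : List String → Nat → Option Nat
  | [], _ => none
  | l :: ls, i =>
    let s := PySem.Str.strip l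
    if PySem.Str.startswith s "\"\"\"" || PySem.Str.startswith s "'''" then some i
    else if s != "" && !PySem.Str.startswith s "#" then none
    else pvFindStartA ls (i + 1)

-- second loop: for i in range(start, len(lines)): if i > start and quotes in lines[i]
def pvFindEndA (lines : List String) (q : String) (start : Nat) (i : Nat) : Option Nat :=
  if h : i < lines.length then
    if start < i && PySem.Str.isIn q lines[i] then some i
    else pvFindEndA lines q start (i + 1)
  else none
termination_by lines.length - i

-- third loop: while code_start < len(lines) and not lines[code_start].strip()
def pvSkipBlanksA (lines : List String) (i : Nat) : Nat :=
  if h : i < lines.length then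
    if PySem.Str.strip lines[i] == "" then pvSkipBlanksA lines (i + 1) else i
  else i
termination_by lines.length - i

def detect_and_remove_docstring (content : String) : String × Bool :=
  let lines := PySem.Str.splitlines content
  match pvFindStartA lines 0 with
  | none => (content, false)
  | some start =>
    -- lines[docstring_start].strip()[0:3]; start is in range, so plain getD is Python's indexing here
    let q := PySem.Str.slice (PySem.Str.strip (lines.getD start "")) (some 0) (some 3)
    match pvFindEndA lines q start start with
    | none => (content, false)
    | some e =>
      let codeStart := pvSkipBlanksA lines (e + 1)
      -- "\n".join(lines[code_start:]) with code_start ≥ 0 is join of drop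
      (PySem.Str.join "\n" (lines.drop codeStart), true)

-- ===== PORT B =====
-- one pass; the list argument is lines[idx:], so "\n".join(lines[idx:]) is join of the current suffix
def pvScanB (content : String) : List String → Nat → String → String × Bool
  | [], st, _ => if st == 2 then ("", true) else (content, false)
  | l :: rest, st, q =>
    if st == 0 then
      let s := PySem.Str.strip l
      if PySem.Str.startswith s "\"\"\"" || PySem.Str.startswith s "'''" then
        pvScanB content rest 1 (PySem.Str.slice s (some 0) (some 3))
      else if s != "" && !PySem.Str.startswith s "#" then (content, false)
      else pvScanB content rest 0 q
    else if st == 1 then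
      pvScanB content rest (if PySem.Str.isIn q l then 2 else 1) q
    else if PySem.Str.strip l != "" then (PySem.Str.join "\n" (l :: rest), true)
    else pvScanB content rest 2 q

def detect_and_remove_docstring_alt (content : String) : String × Bool :=
  pvScanB content (PySem.Str.splitlines content) 0 ""

-- ===== PRECONDITION & SPEC =====
def Spec_detect_and_remove_docstring (content : String) (out : String × Bool) : Prop := out = detect_and_remove_docstring_alt content
instance (content : String) (out : String × Bool) : Decidable (Spec_detect_and_remove_docstring content out) := by unfold Spec_detect_and_remove_docstring; infer_instance

-- ===== CLAIM (what is proved, stated in full; the proofs are below) =====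
def Claim_equal_detect_and_remove_docstring : Prop := ∀ (content : String), Dom_detect_and_remove_docstring content → Spec_detect_and_remove_docstring content (detect_and_remove_docstring content)

-- ===== LEMMAS AND PROOFS =====

-- state 2 of B = A's blank-skip-then-join, on the suffix starting at i
theorem pvScan_state2 (content : String) (lines : List String) (q : String) :
    ∀ i, i ≤ lines.length →
    pvScanB content (lines.drop i) 2 q
      = (PySem.Str.join "\n" (lines.drop (pvSkipBlanksA lines i)), true) := by
  intro i
  induction hk : lines.length - i generalizing i with
  | zero =>
    intro hi
    have he : i = lines.length := by omega
    rw [pvSkipBlanksA]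
    simp only [he, List.drop_length, lt_self_iff_false, dite_false]
    simp [pvScanB]
    rfl
  | succ n ih =>
    intro hi
    have hlt : i < lines.length := by omega
    rw [List.drop_eq_getElem_cons hlt, pvSkipBlanksA]
    simp only [hlt, dite_true]
    by_cases hb : PySem.Str.strip lines[i] = ""
    · have := ih (i+1) (by omega) (by omega)
      simp [pvScanB, hb, this]
    · simp [pvScanB, hb, ← List.drop_eq_getElem_cons hlt]

-- state 1 of B = A's closer search (for start < i) followed by the tail of A
theorem pvScan_state1 (content : String) (lines : List String) (q : String) (start : Nat) :
    ∀ i, start < i → i ≤ lines.length →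
    pvScanB content (lines.drop i) 1 q
      = (match pvFindEndA lines q start i with
         | none => (content, false)
         | some e => (PySem.Str.join "\n" (lines.drop (pvSkipBlanksA lines (e + 1))), true)) := by
  intro i
  induction hk : lines.length - i generalizing i with
  | zero =>
    intro hs hi
    have he : i = lines.length := by omega
    rw [pvFindEndA]
    simp [he, List.drop_length, pvScanB]
  | succ n ih =>
    intro hs hi
    have hlt : i < lines.length := by omega
    rw [List.drop_eq_getElem_cons hlt, pvFindEndA]
    simp only [hlt, dite_true, hs, decide_true, Bool.true_and]
    by_cases hin : PySem.Str.isIn q lines[i]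
    · simp only [pvScanB, hin, if_true]
      have h2 := pvScan_state2 content lines q (i+1) (by omega)
      simp [h2]
    · simp only [pvScanB, hin, Bool.false_eq_true, if_false]
      have := ih (i+1) (by omega) (by omega) (by omega)
      simp [this]

-- state 0 of B = A's whole pipeline, on the suffix starting at i
theorem pvScan_state0 (content : String) (lines : List String) (q : String) :
    ∀ i, i ≤ lines.length →
    pvScanB content (lines.drop i) 0 q
      = (match pvFindStartA (lines.drop i) i with
         | none => (content, false)
         | some start =>
           let qs := PySem.Str.slice (PySem.Str.strip (lines.getD start "")) (some 0) (some 3)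
           match pvFindEndA lines qs start start with
           | none => (content, false)
           | some e => (PySem.Str.join "\n" (lines.drop (pvSkipBlanksA lines (e + 1))), true)) := by
  intro i
  induction hk : lines.length - i generalizing i with
  | zero =>
    intro hi
    have he : i = lines.length := by omega
    simp [he, List.drop_length, pvScanB, pvFindStartA]
  | succ n ih =>
    intro hi
    have hlt : i < lines.length := by omega
    rw [List.drop_eq_getElem_cons hlt]
    by_cases hop : (PySem.Chars.startswith (PySem.Chars.strip lines[i].toList) ['\"', '\"', '\"'] = true ∨
          PySem.Chars.startswith (PySem.Chars.strip lines[i].toList) ['\'', '\'', '\''] = true)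
    · have hend : pvFindEndA lines (PySem.Str.slice (PySem.Str.strip lines[i]) (some 0) (some 3)) i i
          = pvFindEndA lines (PySem.Str.slice (PySem.Str.strip lines[i]) (some 0) (some 3)) i (i + 1) := by
        rw [pvFindEndA]
        simp [hlt]
      have h1 := pvScan_state1 content lines
        (PySem.Str.slice (PySem.Str.strip lines[i]) (some 0) (some 3)) i (i+1) (by omega) (by omega)
      simp [pvScanB, pvFindStartA, hop, h1, List.getElem?_eq_getElem hlt, ← hend]
    · by_cases hbr : (¬PySem.Str.strip lines[i] = "" ∧
          PySem.Chars.startswith (PySem.Chars.strip lines[i].toList) ['#'] = false)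
      · simp [pvScanB, pvFindStartA, hop, hbr]
      · have := ih (i+1) (by omega) (by omega)
        simp [pvScanB, pvFindStartA, hop, hbr, this]

-- ===== VERDICT (by name: the statement is the Claim_ definition above) =====
theorem detect_and_remove_docstring_spec : Claim_equal_detect_and_remove_docstring := by
  intro content _
  unfold Spec_detect_and_remove_docstring detect_and_remove_docstring detect_and_remove_docstring_alt
  have h := pvScan_state0 content (PySem.Str.splitlines content) "" 0 (Nat.zero_le _)
  simp only [List.drop_zero] at h
  rw [h]
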